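-- pv_equiv track=rewrite | github.com/cirosantilli/project-euler-solvers | solvers/492.py | a_mod_prime
-- ===== SOURCE A (Python) =====
-- from typing import Iterator, List, Tuple
--
-- P = 11
--
-- RESIDUES_13 = {1, 3, 4, 9, 10, 12}
--
-- def lucas_U_pair(n: int, mod: int) -> Tuple[int, int]:
--     """Return (U_n, U_{n+1}) mod mod for Lucas parameters P=11, Q=1.
--
--     U_0 = 0, U_1 = 1, U_{k+1} = P*U_k - U_{k-1}.
--
--     Uses an iterative fast-doubling method (O(log n)).
--     """
--     if n == 0:
--         return 0, 1
--
--     u, up1 = 0, 1  # (U_0, U_1)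
--     mask = 1 << (n.bit_length() - 1)
--
--     while mask:
--         # Doubling step: from k to 2k and 2k+1.
--         v = (2 * up1 - P * u) % mod  # V_k
--         u2k = (u * v) % mod
--         u2k1 = (up1 * v - 1) % mod
--
--         if n & mask:
--             # Move to (U_{2k+1}, U_{2k+2})
--             u2k2 = (P * u2k1 - u2k) % mod
--             u, up1 = u2k1, u2k2
--         else:
--             u, up1 = u2k, u2k1
--
--         mask >>= 1
--
--     return u, up1
--
-- def lucas_V(n: int, mod: int) -> int:
--     """Return V_n mod mod for Lucas parameters P=11, Q=1.
--
--     V_0 = 2, V_1 = P, V_{k+1} = P*V_k - V_{k-1}.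
--
--     Relation with U:
--         V_n = 2*U_{n+1} - P*U_n  (valid for Q=1, including n=0)
--     """
--     u, up1 = lucas_U_pair(n, mod)
--     return (2 * up1 - P * u) % mod
--
-- def a_mod_prime(n: int, p: int) -> int:
--     """Compute a_n mod prime p."""
--     if p in (2, 3):
--         # 6 is not invertible mod 2 or 3; just iterate directly.
--         a = 1 % p
--         for _ in range(1, n):
--             a = (6 * a * a + 10 * a + 3) % p
--         return a
--
--     # Order reduction:
--     # Let D = P^2 - 4 = 117. For Q=1 the element alpha has norm 1.
--     # In GF(p): if D is a residue, ord(alpha) | (p-1)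
--     # In GF(p^2): if D is a non-residue, ord(alpha) | (p+1)
--     # So V_k (and hence u_n) depends on k modulo M = p - (D/p).
--     # Here (D/p) = (13/p) = (p/13) via quadratic reciprocity.
--     leg = 1 if (p % 13) in RESIDUES_13 else -1
--     m = p - leg  # p-1 if residue, p+1 otherwise
--
--     # u_n = V_{2^{n-1}}; reduce the huge index modulo m.
--     e = pow(2, n - 1, m)
--     u_n = lucas_V(e, p)
--
--     # Back-transform: a_n = (u_n - 5) / 6 (mod p)
--     inv6 = pow(6, -1, p)
--     return ((u_n - 5) * inv6) % p
-- ===== SOURCE B (Python) =====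
-- RESIDUES_13 = {1, 3, 4, 9, 10, 12}
--
-- def _mmul(A, B, mod):
--     a, b, c, d = A
--     e, f, g, h = B
--     return ((a * e + b * g) % mod, (a * f + b * h) % mod,
--             (c * e + d * g) % mod, (c * f + d * h) % mod)
--
-- def a_mod_prime(n: int, p: int) -> int:
--     """Compute a_n mod prime p."""
--     if p in (2, 3):
--         # a_1 = 1 and x -> 6x^2+10x+3 fixes 1 both mod 2 and mod 3, so a_n = 1 mod p.
--         return 1
--     leg = 1 if (p % 13) in RESIDUES_13 else -1
--     m = p - leg
--     e = pow(2, n - 1, m)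
--     # M = [[11,-1],[1,0]]; M^k = [[U_{k+1}, -U_k],[U_k, -U_{k-1}]].  Square-and-multiply.
--     R = (1 % p, 0, 0, 1 % p)
--     M = (11 % p, (-1) % p, 1 % p, 0)
--     k = e
--     while k:
--         if k & 1:
--             R = _mmul(R, M, p)
--         M = _mmul(M, M, p)
--         k >>= 1
--     up1, _, u, _ = R
--     v = (2 * up1 - 11 * u) % p       # V_e = 2*U_{e+1} - P*U_e
--     return ((v - 5) * pow(6, -1, p)) % p
-- ===== Notes on version B (the rewrite author's own statement) =====
-- stated objective: alternative
-- what changed: Replaces the specialized Lucas fast-doubling (MSB-first mask loop over doubling identities) with generic 2x2 matrix square-and-multiply for M=[[11,-1],[1,0]] (reading U_e, U_{e+1} from M^e), and replaces the p in {2,3} iteration by its closed form 1 (1 is a fixed point of x->6x^2+10x+3 mod 2 and mod 3).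
-- outside the precondition, e.g. on a_mod_prime(2, -5): A returns -1, B does not finish within the time limit
import Mathlib
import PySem

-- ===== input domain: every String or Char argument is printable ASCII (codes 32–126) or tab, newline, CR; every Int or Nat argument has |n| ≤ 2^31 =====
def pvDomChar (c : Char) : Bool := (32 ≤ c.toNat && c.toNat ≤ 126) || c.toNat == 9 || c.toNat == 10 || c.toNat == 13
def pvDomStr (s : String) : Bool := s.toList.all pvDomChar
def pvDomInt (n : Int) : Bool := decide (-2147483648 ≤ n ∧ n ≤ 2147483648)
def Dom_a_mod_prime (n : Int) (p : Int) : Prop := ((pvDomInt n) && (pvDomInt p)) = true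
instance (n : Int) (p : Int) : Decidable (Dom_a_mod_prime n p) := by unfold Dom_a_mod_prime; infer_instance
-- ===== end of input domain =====

-- B replaces A's Lucas fast-doubling by 2x2 matrix square-and-multiply and the p ∈ {2,3}
-- iteration by its closed form 1 (objective: alternative; same O(log n) cost on the main path).

-- ===== PORT A =====

-- shared port of the builtin pow(a, -1, m) (extended Euclid, exact for gcd(a,m)=1, m > 1,
-- a ≥ 0: the unique inverse in [0, m), which is what CPython returns)
def pvEgcd (a b : Nat) : Int × Int :=
  if h : b = 0 then (1, 0)
  else
    let q := pvEgcd b (a % b)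
    (q.2, q.1 - ((a / b : Nat) : Int) * q.2)
termination_by b
decreasing_by exact Nat.mod_lt _ (Nat.pos_of_ne_zero h)

def pvInvMod (a m : Int) : Int := PySem.Int.mod (pvEgcd a.toNat m.toNat).1 m

-- bits of a Nat, least significant first (the Python walks the same bits via `mask`)
def pvBitsLE (m : Nat) : List Bool :=
  if hm : m = 0 then [] else (m % 2 == 1) :: pvBitsLE (m / 2)
termination_by m
decreasing_by exact Nat.div_lt_self (Nat.pos_of_ne_zero hm) (by norm_num)

-- one iteration of A's fast-doubling loop body
def pvLucasStep (mod : Int) (st : Int × Int) (b : Bool) : Int × Int :=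
  let u := st.1
  let up1 := st.2
  let v := PySem.Int.mod (2 * up1 - 11 * u) mod
  let u2k := PySem.Int.mod (u * v) mod
  let u2k1 := PySem.Int.mod (up1 * v - 1) mod
  if b then (u2k1, PySem.Int.mod (11 * u2k1 - u2k) mod) else (u2k, u2k1)

def pvLucasUPair (n : Int) (mod : Int) : Int × Int :=
  if n = 0 then (0, 1)
  else ((pvBitsLE n.toNat).reverse).foldl (pvLucasStep mod) (0, 1)

def pvLucasV (n : Int) (mod : Int) : Int :=
  let st := pvLucasUPair n mod
  PySem.Int.mod (2 * st.2 - 11 * st.1) mod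

def a_mod_prime (n : Int) (p : Int) : Int :=
  if p = 2 ∨ p = 3 then
    (PySem.List.pyRange 1 n 1).foldl
      (fun a _ => PySem.Int.mod (6 * a * a + 10 * a + 3) p) (PySem.Int.mod 1 p)
  else
    let leg : Int := if PySem.Int.mod p 13 ∈ ([1, 3, 4, 9, 10, 12] : List Int) then 1 else -1
    let m := p - leg
    let e := PySem.Int.powMod 2 (n - 1).toNat m
    let u_n := pvLucasV e p
    let inv6 := pvInvMod 6 p
    PySem.Int.mod ((u_n - 5) * inv6) p

-- ===== PORT B =====

def pvMMul (mod : Int) (A B : Int × Int × Int × Int) : Int × Int × Int × Int :=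
  (PySem.Int.mod (A.1 * B.1 + A.2.1 * B.2.2.1) mod,
   PySem.Int.mod (A.1 * B.2.1 + A.2.1 * B.2.2.2) mod,
   PySem.Int.mod (A.2.2.1 * B.1 + A.2.2.2 * B.2.2.1) mod,
   PySem.Int.mod (A.2.2.1 * B.2.1 + A.2.2.2 * B.2.2.2) mod)

-- Source B's `while k:` square-and-multiply loop
def pvMatPowAux (mod : Int) (k : Nat) (R M : Int × Int × Int × Int) : Int × Int × Int × Int :=
  if h : k = 0 then R
  else pvMatPowAux mod (k / 2) (if k % 2 = 1 then pvMMul mod R M else R) (pvMMul mod M M)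
termination_by k
decreasing_by exact Nat.div_lt_self (Nat.pos_of_ne_zero h) (by norm_num)

def a_mod_prime_alt (n : Int) (p : Int) : Int :=
  if p = 2 ∨ p = 3 then 1
  else
    let leg : Int := if PySem.Int.mod p 13 ∈ ([1, 3, 4, 9, 10, 12] : List Int) then 1 else -1
    let m := p - leg
    let e := PySem.Int.powMod 2 (n - 1).toNat m
    let R := pvMatPowAux p e.toNat
      (PySem.Int.mod 1 p, 0, 0, PySem.Int.mod 1 p)
      (PySem.Int.mod 11 p, PySem.Int.mod (-1) p, PySem.Int.mod 1 p, 0)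
    let v := PySem.Int.mod (2 * R.1 - 11 * R.2.2.1) p
    PySem.Int.mod ((v - 5) * pvInvMod 6 p) p

-- ===== PRECONDITION & SPEC =====
-- Natural domain of "a_n mod prime p", n ≥ 1 (for p ∈ {2,3} A accepts every n and we keep that).
-- Excluded: n ≤ 0 with p ∉ {2,3} and p ∈ {0,1,4} or p ∉ {2,3} divisible by 2 or 3, where A
-- raises ValueError (pow with non-invertible base or zero modulus); and negative p, outside the
-- stated prime domain, where A's value is an accident of Python's negative-divisor %.
def Pre_a_mod_prime (n : Int) (p : Int) : Prop :=
  p = 2 ∨ p = 3 ∨ (1 ≤ n ∧ 5 ≤ p ∧ ¬ (2 ∣ p) ∧ ¬ (3 ∣ p))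
instance (n : Int) (p : Int) : Decidable (Pre_a_mod_prime n p) := by
  unfold Pre_a_mod_prime; infer_instance

def pvWitness_a_mod_prime : Int × Int := (3, 5)

def Spec_a_mod_prime (n : Int) (p : Int) (out : Int) : Prop := out = a_mod_prime_alt n p
instance (n : Int) (p : Int) (out : Int) : Decidable (Spec_a_mod_prime n p out) := by
  unfold Spec_a_mod_prime; infer_instance

-- ===== CLAIM (what is proved, stated in full; the proofs are below) =====
def Claim_equal_a_mod_prime : Prop := ∀ (n : Int) (p : Int), Dom_a_mod_prime n p →
  Pre_a_mod_prime n p → Spec_a_mod_prime n p (a_mod_prime n p)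

-- ===== LEMMAS AND PROOFS =====

-- the Lucas sequence U_k for P = 11, Q = 1, over ℤ
def pvU : Nat → Int
  | 0 => 0
  | 1 => 1
  | (k + 2) => 11 * pvU (k + 1) - pvU k

-- Catalan-style invariant  U_{k+1}^2 - 11 U_k U_{k+1} + U_k^2 = 1
theorem pvU_J (k : Nat) : pvU (k + 1) ^ 2 - 11 * pvU k * pvU (k + 1) + pvU k ^ 2 = 1 := by
  induction k with
  | zero => simp [pvU]
  | succ k ih =>
    have h2 : pvU (k + 2) = 11 * pvU (k + 1) - pvU k := rfl
    rw [h2]; linear_combination ih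

-- addition formulas
theorem pvU_add (a : Nat) : ∀ b : Nat,
    pvU (a + b) = pvU (a + 1) * pvU b + pvU a * pvU (b + 1) - 11 * pvU a * pvU b ∧
    pvU (a + b + 1) = pvU (a + 1) * pvU (b + 1) - pvU a * pvU b := by
  intro b
  induction b with
  | zero => simp [pvU]
  | succ b ih =>
    have h2 : pvU (b + 2) = 11 * pvU (b + 1) - pvU b := rfl
    constructor
    · show pvU (a + b + 1) = _
      rw [h2]; linear_combination ih.2
    · show pvU (a + b + 2) = _
      have h3 : pvU (a + b + 2) = 11 * pvU (a + b + 1) - pvU (a + b) := rfl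
      rw [h3, h2]; linear_combination 11 * ih.2 - ih.1

theorem pv_hmod (p a : Int) : a % p ≡ a [ZMOD p] := Int.emod_emod_of_dvd a dvd_rfl

-- value encoded by a bit list (LSB first) around an accumulator k
def pvIdx : List Bool → Nat → Nat
  | [], k => k
  | b :: l, k => 2 * pvIdx l k + (if b then 1 else 0)

theorem pvIdx_bitsLE (m : Nat) : ∀ k : Nat,
    pvIdx (pvBitsLE m) k = k * 2 ^ (pvBitsLE m).length + m := by
  induction m using Nat.strong_induction_on with
  | _ m ih =>
    intro k
    rw [pvBitsLE]
    by_cases h : m = 0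
    · simp [h, pvIdx]
    · simp only [h, dite_false]
      have := ih (m / 2) (Nat.div_lt_self (Nat.pos_of_ne_zero h) (by norm_num)) k
      simp only [pvIdx, this, List.length_cons, pow_succ]
      have hA : k * (2 ^ (pvBitsLE (m / 2)).length * 2) =
          2 * (k * 2 ^ (pvBitsLE (m / 2)).length) := by ring
      rcases Nat.mod_two_eq_zero_or_one m with hm | hm <;> simp [hm] <;> omega

-- A's loop invariant: the fold carries (U_k mod p, U_{k+1} mod p)
theorem pvLucas_foldr (p : Int) (hp : 5 ≤ p) : ∀ (l : List Bool) (k : Nat),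
    l.foldr (fun b st => pvLucasStep p st b) (pvU k % p, pvU (k + 1) % p) =
      (pvU (pvIdx l k) % p, pvU (pvIdx l k + 1) % p) := by
  intro l
  induction l with
  | nil => intro k; rfl
  | cons b l ih =>
    intro k
    rw [List.foldr_cons, ih k]
    set j := pvIdx l k with hj
    have hp0 : (0:Int) < p := by omega
    have hbridge : ∀ x : Int, PySem.Int.mod x p = x % p :=
      fun x => PySem.Int.mod_eq_emod_of_pos (a := x) hp0
    have i1 : pvU (j + j) = pvU j * (2 * pvU (j + 1) - 11 * pvU j) := by
      linear_combination (pvU_add j j).1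
    have i2 : pvU (j + j + 1) = pvU (j + 1) * (2 * pvU (j + 1) - 11 * pvU j) - 1 := by
      linear_combination (pvU_add j j).2 - pvU_J j
    have ev : (2 * (pvU (j + 1) % p) - 11 * (pvU j % p)) % p ≡
        2 * pvU (j + 1) - 11 * pvU j [ZMOD p] :=
      (pv_hmod p _).trans (((pv_hmod p _).mul_left 2).sub ((pv_hmod p _).mul_left 11))
    have c1 : (pvU j % p) * ((2 * (pvU (j + 1) % p) - 11 * (pvU j % p)) % p) % p =
        pvU (j + j) % p := by
      rw [i1]; exact (pv_hmod p _).mul ev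
    have c2 : ((pvU (j + 1) % p) * ((2 * (pvU (j + 1) % p) - 11 * (pvU j % p)) % p) - 1) % p =
        pvU (j + j + 1) % p := by
      rw [i2]; exact ((pv_hmod p _).mul ev).sub_right 1
    have i3 : pvU (j + j + 2) = 11 * pvU (j + j + 1) - pvU (j + j) := rfl
    have c3 : (11 * (((pvU (j + 1) % p) * ((2 * (pvU (j + 1) % p) - 11 * (pvU j % p)) % p) - 1) % p)
        - (pvU j % p) * ((2 * (pvU (j + 1) % p) - 11 * (pvU j % p)) % p) % p) % p =
        pvU (j + j + 2) % p := by
      have m1 : ((pvU (j + 1) % p) * ((2 * (pvU (j + 1) % p) - 11 * (pvU j % p)) % p) - 1) % p ≡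
          pvU (j + j + 1) [ZMOD p] := c2 ▸ pv_hmod p (pvU (j + j + 1))
      have m2 : (pvU j % p) * ((2 * (pvU (j + 1) % p) - 11 * (pvU j % p)) % p) % p ≡
          pvU (j + j) [ZMOD p] := c1 ▸ pv_hmod p (pvU (j + j))
      rw [i3]; exact (m1.mul_left 11).sub m2
    cases b with
    | false =>
      have hix : pvIdx (false :: l) k = j + j := by simp [pvIdx, ← hj]; omega
      rw [hix]
      simp only [pvLucasStep, Bool.false_eq_true, if_false, hbridge]
      exact Prod.ext c1 c2
    | true =>
      have hix : pvIdx (true :: l) k = j + j + 1 := by simp [pvIdx, ← hj]; omega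
      rw [hix]
      simp only [pvLucasStep, if_true, hbridge]
      exact Prod.ext c2 (by rw [show j + j + 1 + 1 = j + j + 2 from rfl]; exact c3)

theorem pvLucasUPair_spec (p : Int) (hp : 5 ≤ p) (e : Int) :
    pvLucasUPair e p = (pvU e.toNat % p, pvU (e.toNat + 1) % p) := by
  have h1p : (1:Int) % p = 1 := Int.emod_eq_of_lt (by norm_num) (by omega)
  rw [pvLucasUPair]
  by_cases h0 : e = 0
  · simp [h0, pvU, h1p]
  · rw [if_neg h0, List.foldl_reverse]
    have := pvLucas_foldr p hp (pvBitsLE e.toNat) 0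
    simp only [pvU, Int.zero_emod, h1p] at this
    rw [show ((0:Int), (1:Int)) = ((pvU 0 % p, pvU 1 % p) : Int × Int) by simp [pvU, h1p]]
    rw [pvLucas_foldr p hp, pvIdx_bitsLE]
    simp

-- B's reduced matrix  M^k mod p ; note -U_{k-1} = U_{k+1} - 11 U_k
def pvNm (p : Int) (k : Nat) : Int × Int × Int × Int :=
  (pvU (k + 1) % p, (-pvU k) % p, pvU k % p, (pvU (k + 1) - 11 * pvU k) % p)

theorem pvMMul_Nm (p : Int) (hp : 5 ≤ p) (a b : Nat) :
    pvMMul p (pvNm p a) (pvNm p b) = pvNm p (a + b) := by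
  have hp0 : (0:Int) < p := by omega
  have hbridge : ∀ x : Int, PySem.Int.mod x p = x % p :=
    fun x => PySem.Int.mod_eq_emod_of_pos (a := x) hp0
  have h1 := (pvU_add a b).1
  have h2 := (pvU_add a b).2
  have m : ∀ x y x' y' : Int, (x % p) * (y % p) + (x' % p) * (y' % p) ≡
      x * y + x' * y' [ZMOD p] :=
    fun x y x' y' => ((pv_hmod p x).mul (pv_hmod p y)).add ((pv_hmod p x').mul (pv_hmod p y'))
  simp only [pvMMul, pvNm, hbridge]
  refine Prod.ext ?_ (Prod.ext ?_ (Prod.ext ?_ ?_))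
  · show _ % p = pvU (a + b + 1) % p
    have : pvU (a + b + 1) = pvU (a + 1) * pvU (b + 1) + (-pvU a) * pvU b := by
      linear_combination h2
    rw [this]; exact m _ _ _ _
  · show _ % p = (-pvU (a + b)) % p
    have : -pvU (a + b) = pvU (a + 1) * (-pvU b) + (-pvU a) * (pvU (b + 1) - 11 * pvU b) := by
      linear_combination -h1
    rw [this]; exact m _ _ _ _
  · show _ % p = pvU (a + b) % p
    have : pvU (a + b) = pvU a * pvU (b + 1) + (pvU (a + 1) - 11 * pvU a) * pvU b := by
      linear_combination h1
    rw [this]; exact m _ _ _ _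
  · show _ % p = (pvU (a + b + 1) - 11 * pvU (a + b)) % p
    have : pvU (a + b + 1) - 11 * pvU (a + b) =
        pvU a * (-pvU b) + (pvU (a + 1) - 11 * pvU a) * (pvU (b + 1) - 11 * pvU b) := by
      linear_combination h2 - 11 * h1
    rw [this]; exact m _ _ _ _

theorem pvMatPowAux_Nm (p : Int) (hp : 5 ≤ p) : ∀ (k r s : Nat),
    pvMatPowAux p k (pvNm p r) (pvNm p s) = pvNm p (r + s * k) := by
  intro k
  induction k using Nat.strong_induction_on with
  | _ k ih =>
    intro r s
    rw [pvMatPowAux]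
    by_cases h : k = 0
    · simp [h]
    · simp only [h, dite_false]
      have hlt := Nat.div_lt_self (Nat.pos_of_ne_zero h) (show 1 < 2 by norm_num)
      rw [pvMMul_Nm p hp s s]
      by_cases h2 : k % 2 = 1
      · rw [if_pos h2, pvMMul_Nm p hp r s, ih (k / 2) hlt (r + s) (s + s)]
        obtain ⟨t, rfl⟩ : ∃ t, k = 2 * t + 1 := ⟨k / 2, by omega⟩
        have ht : (2 * t + 1) / 2 = t := by omega
        rw [ht]; congr 1; ring
      · rw [if_neg h2, ih (k / 2) hlt r (s + s)]
        obtain ⟨t, rfl⟩ : ∃ t, k = 2 * t := ⟨k / 2, by omega⟩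
        have ht : 2 * t / 2 = t := by omega
        rw [ht]; congr 1; ring

theorem pvNm_zero (p : Int) (hp : 5 ≤ p) :
    (PySem.Int.mod 1 p, (0:Int), (0:Int), PySem.Int.mod 1 p) = pvNm p 0 := by
  have hp0 : (0:Int) < p := by omega
  simp [pvNm, pvU, PySem.Int.mod_eq_emod_of_pos hp0]

theorem pvNm_one (p : Int) (hp : 5 ≤ p) :
    (PySem.Int.mod 11 p, PySem.Int.mod (-1) p, PySem.Int.mod 1 p, (0:Int)) = pvNm p 1 := by
  have hp0 : (0:Int) < p := by omega
  simp [pvNm, pvU, PySem.Int.mod_eq_emod_of_pos hp0]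

-- the p ∈ {2,3} loop keeps a = 1 forever
theorem pvLoop1 (p : Int) (hp : p = 2 ∨ p = 3) (l : List Int) :
    l.foldl (fun a _ => PySem.Int.mod (6 * a * a + 10 * a + 3) p) 1 = 1 := by
  induction l with
  | nil => rfl
  | cons x l ih =>
    rw [List.foldl_cons]
    have : PySem.Int.mod (6 * 1 * 1 + 10 * 1 + 3) p = 1 := by
      rcases hp with h | h <;> subst h <;> decide
    rw [this]; exact ih

-- ===== VERDICT (by name: the statement is the Claim_ definition above) =====
theorem a_mod_prime_spec : Claim_equal_a_mod_prime := by
  intro n p _ hpre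
  unfold Spec_a_mod_prime a_mod_prime a_mod_prime_alt
  rcases hpre with h | h | ⟨hn, hp5, h2, h3⟩
  · rw [if_pos (Or.inl h), if_pos (Or.inl h)]
    have h1 : PySem.Int.mod 1 p = 1 := by subst h; decide
    rw [h1, pvLoop1 p (Or.inl h)]
  · rw [if_pos (Or.inr h), if_pos (Or.inr h)]
    have h1 : PySem.Int.mod 1 p = 1 := by subst h; decide
    rw [h1, pvLoop1 p (Or.inr h)]
  · have hne : ¬ (p = 2 ∨ p = 3) := by omega
    rw [if_neg hne, if_neg hne]
    set leg : Int := if PySem.Int.mod p 13 ∈ ([1, 3, 4, 9, 10, 12] : List Int) then 1 else -1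
      with hleg
    show PySem.Int.mod
        ((pvLucasV (PySem.Int.powMod 2 (n - 1).toNat (p - leg)) p - 5) * pvInvMod 6 p) p =
      PySem.Int.mod
        (((PySem.Int.mod (2 * (pvMatPowAux p (PySem.Int.powMod 2 (n - 1).toNat (p - leg)).toNat
            (PySem.Int.mod 1 p, 0, 0, PySem.Int.mod 1 p)
            (PySem.Int.mod 11 p, PySem.Int.mod (-1) p, PySem.Int.mod 1 p, 0)).1 -
          11 * (pvMatPowAux p (PySem.Int.powMod 2 (n - 1).toNat (p - leg)).toNat
            (PySem.Int.mod 1 p, 0, 0, PySem.Int.mod 1 p)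
            (PySem.Int.mod 11 p, PySem.Int.mod (-1) p, PySem.Int.mod 1 p, 0)).2.2.1) p) - 5) *
          pvInvMod 6 p) p
    have hlegv : leg = 1 ∨ leg = -1 := by
      rw [hleg]; split <;> simp
    have hm : (0:Int) < p - leg := by rcases hlegv with h | h <;> omega
    set e := PySem.Int.powMod 2 (n - 1).toNat (p - leg) with he
    rw [pvNm_zero p hp5, pvNm_one p hp5, pvMatPowAux_Nm p hp5 e.toNat 0 1]
    rw [pvLucasV, pvLucasUPair_spec p hp5 e]
    simp [pvNm]

-- excluded-input witnesses referenced from claim.json: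
--   A(2, -5) = -1 (negative p, outside the prime domain); B does not terminate there.
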